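-- pv_equiv track=rewrite | github.com/wemarques/prognosticos-brasileirao | data/processor.py | _calculate_form_points
-- ===== SOURCE A (Python) =====
-- def _calculate_form_points(form: str) -> int:
--     """
--     Calcula pontos da forma recente
--
--     Args:
--         form: String tipo "WWDLW" (W=win, D=draw, L=loss)
--
--     Returns:
--         Pontos totais (W=3, D=1, L=0)
--     """
--     points = 0
--     for result in form[-5:]:  # Últimos 5 jogos
--         if result == 'W':
--             points += 3
--         elif result == 'D':
--             points += 1
--     return points
-- ===== SOURCE B (Python) =====
-- _POINTS = {'W': 3, 'D': 1}
--
--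
-- def _calculate_form_points(form: str) -> int:
--     # Walk the string back-to-front (most recent game first), scoring at
--     # most 5 games recursively via a points table.
--     return _recent_points(form[::-1], 5)
--
--
-- def _recent_points(rev: str, k: int) -> int:
--     if not rev:
--         return 0
--     if k == 0:
--         return 0
--     return _POINTS.get(rev[0], 0) + _recent_points(rev[1:], k - 1)
-- ===== Notes on version B (the rewrite author's own statement) =====
-- stated objective: alternative
-- what changed: Replaced the slice-then-accumulate loop by a budgeted recursion over the reversed string (most recent game first) with a points table lookup per game; no slice, no loop, no accumulator.
import Mathlib
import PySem

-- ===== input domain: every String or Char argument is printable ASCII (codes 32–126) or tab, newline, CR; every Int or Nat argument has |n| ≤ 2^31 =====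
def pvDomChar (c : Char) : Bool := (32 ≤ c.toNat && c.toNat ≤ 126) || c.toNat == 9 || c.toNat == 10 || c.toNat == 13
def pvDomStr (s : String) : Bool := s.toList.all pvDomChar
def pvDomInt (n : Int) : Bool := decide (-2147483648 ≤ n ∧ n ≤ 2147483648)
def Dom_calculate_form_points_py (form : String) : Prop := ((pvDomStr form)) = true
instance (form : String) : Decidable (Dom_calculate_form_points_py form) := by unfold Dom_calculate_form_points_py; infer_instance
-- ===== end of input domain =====

-- B replaces the slice-then-accumulate loop by a budgeted recursion over the reversed string with a points-table lookup (alternative decomposition).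

-- ===== PORT A =====
-- A: loop over form[-5:], += 3 on 'W', += 1 on 'D'
def calculate_form_points_py (form : String) : Int :=
  (PySem.List.slice form.toList (some (-5)) none).foldl
    (fun points result =>
      if result == 'W' then points + 3
      else if result == 'D' then points + 1
      else points) 0

-- ===== PORT B =====
-- B: _recent_points(rev, k): 0 if rev empty or k == 0, else _POINTS.get(rev[0], 0) + _recent_points(rev[1:], k-1)
def pv_recent_points : List Char → Int → Int
  | [], _ => 0
  | c :: t, k =>
      if k = 0 then 0
      else PySem.Dict.getD (PySem.Dict.ofList [('W', (3 : Int)), ('D', (1 : Int))]) c 0 + pv_recent_points t (k - 1)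

-- B: return _recent_points(form[::-1], 5)   (form[::-1] is the reversal: PySem.List.slice?_none_none_neg_one)
def calculate_form_points_py_alt (form : String) : Int :=
  pv_recent_points form.toList.reverse 5

-- ===== PRECONDITION & SPEC =====
def Spec_calculate_form_points_py (form : String) (out : Int) : Prop := out = calculate_form_points_py_alt form
instance (form : String) (out : Int) : Decidable (Spec_calculate_form_points_py form out) := by unfold Spec_calculate_form_points_py; infer_instance

-- ===== CLAIM (what is proved, stated in full; the proofs are below) =====
def Claim_equal_calculate_form_points_py : Prop := ∀ (form : String), Dom_calculate_form_points_py form → Spec_calculate_form_points_py form (calculate_form_points_py form)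

-- ===== LEMMAS AND PROOFS =====
-- per-character score shared by both characterisations
def pvPts (c : Char) : Int := if c = 'W' then 3 else if c = 'D' then 1 else 0

theorem pv_table_eq (c : Char) :
    PySem.Dict.getD (PySem.Dict.ofList [('W', (3 : Int)), ('D', (1 : Int))]) c 0 = pvPts c := by
  have hmk : PySem.Dict.ofList [('W', (3 : Int)), ('D', (1 : Int))]
      = PySem.Dict.mk [('W', (3 : Int)), ('D', (1 : Int))] := by decide
  rw [hmk]
  by_cases hW : c = 'W'
  · subst hW; decide
  · by_cases hD : c = 'D'
    · subst hD; decide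
    · simp [PySem.Dict.getD, PySem.Dict.get?, pvPts, hW, hD,
            Ne.symm hW, Ne.symm hD]

theorem pv_recent_points_eq (l : List Char) (k : Nat) :
    pv_recent_points l (k : Int) = ((l.take k).map pvPts).sum := by
  induction l generalizing k with
  | nil => simp [pv_recent_points]
  | cons c t ih =>
    cases k with
    | zero => simp [pv_recent_points]
    | succ k =>
      have h0 : ((k + 1 : Nat) : Int) ≠ 0 := by omega
      have h1 : ((k + 1 : Nat) : Int) - 1 = (k : Int) := by omega
      rw [Nat.cast_succ] at h0 h1 ⊢
      rw [pv_recent_points, if_neg h0, h1, ih, pv_table_eq]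
      simp

theorem pv_foldl_eq (l : List Char) (a : Int) :
    l.foldl (fun points result =>
      if result == 'W' then points + 3
      else if result == 'D' then points + 1
      else points) a = a + (l.map pvPts).sum := by
  induction l generalizing a with
  | nil => simp
  | cons c t ih =>
    rw [List.foldl_cons, ih, List.map_cons, List.sum_cons]
    by_cases hW : c = 'W' <;> by_cases hD : c = 'D' <;>
      simp [hW, hD, pvPts] <;> ring

-- ===== VERDICT (by name: the statement is the Claim_ definition above) =====
theorem calculate_form_points_py_spec : Claim_equal_calculate_form_points_py := by
  intro form _
  unfold Spec_calculate_form_points_py calculate_form_points_py calculate_form_points_py_alt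
  set l := form.toList with hl
  rw [PySem.List.slice_from_neg_ofNat l 5 (by omega), pv_foldl_eq,
      show (5 : Int) = ((5 : Nat) : Int) by norm_num,
      pv_recent_points_eq l.reverse 5]
  have h : l.reverse.take 5 = (l.drop (l.length - 5)).reverse := List.take_reverse
  simp [h]
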